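-- pv_equiv track=rewrite | github.com/ArthurFish6/sae105-donnees | rouzeaua-main/tools/tools_fait_maison.py | regroupe_regulier
-- ===== SOURCE A (Python) =====
-- def regroupe_regulier(liste, case):
--     """
--          +---------------------------------------------------------------------------------+
--          |                                                                                 |
--          |                               REGROUPE_REGULIER                                 |
--          |                                                                                 |
--          +---------------------------------------------------------------------------------+
--          |                                                                                 |
--          |   [?] Regroupe des élémément de la même façon à partir d'une "case"             |
--          |                                                                                 |
--          |   [*] LISTE  LISTE                                                              |
--          |                                                                                 |
--          +---------------------------------------------------------------------------------+
--     """#doc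
--
--     #code
--     li = []
--     li2 = []
--     liste.append("END")
--     for i in range(0, len(liste)):
--         if i % case == 0 and i != 0:
--             li2.append("".join(li))
--             li = []
--         li.append(liste[i])
--     return li2
-- ===== SOURCE B (Python) =====
-- def regroupe_regulier(liste, case):
--     liste.append("END")
--     k = (len(liste) - 1) // case
--     return ["".join(liste[i * case:(i + 1) * case]) for i in range(k)]
-- ===== Notes on version B (the rewrite author's own statement) =====
-- stated objective: simpler
-- what changed: B replaces A's index loop with flush-at-modulo-boundary accumulator lists by computing the chunk count (len-1)//case after the append and slicing-and-joining each chunk by its index; Pre_ excludes case <= 0: case = 0 raises ZeroDivisionError in both, and for negative case A's abs-like chunking is an accidental artefact of Python's sign rule for %, where B naturally produces no chunks.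
-- outside the precondition, e.g. on regroupe_regulier(['a', 'b'], -2): A returns ['ab'], B returns []; on regroupe_regulier(['a'], 0): A raises ZeroDivisionError, B raises ZeroDivisionError
import Mathlib
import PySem

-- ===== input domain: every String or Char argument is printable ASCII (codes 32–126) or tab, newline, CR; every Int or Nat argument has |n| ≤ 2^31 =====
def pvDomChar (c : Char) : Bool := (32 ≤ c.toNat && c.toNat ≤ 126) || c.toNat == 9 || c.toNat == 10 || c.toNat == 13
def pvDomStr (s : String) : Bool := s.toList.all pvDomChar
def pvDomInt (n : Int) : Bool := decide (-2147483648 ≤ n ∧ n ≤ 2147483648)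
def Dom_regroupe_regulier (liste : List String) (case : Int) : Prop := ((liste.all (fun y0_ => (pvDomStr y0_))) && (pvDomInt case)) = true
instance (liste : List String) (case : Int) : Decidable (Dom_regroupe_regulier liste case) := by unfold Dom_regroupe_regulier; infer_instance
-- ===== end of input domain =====

-- B replaces A's index loop with flush-at-boundary accumulators by direct chunk-index slicing (simpler decomposition, same cost).
-- Note: both A and B append "END" to the argument list in place; the equivalence proved is about the return value (the mutation is identical).


-- ===== PORT A =====
-- loop body of A's 'for i in range(0, len(liste))' (li, li2 are the two accumulators)
def stepA (L : List String) (case : Int) (st : List String × List String) (i : Int) :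
    List String × List String :=
  let st := if PySem.Int.mod i case = 0 ∧ i ≠ 0
            then (([] : List String), st.2 ++ [PySem.Str.join "" st.1])
            else st
  (st.1 ++ [PySem.List.pyGetD L i ""], st.2)

def regroupe_regulier (liste : List String) (case : Int) : List String :=
  let L := liste ++ ["END"]                      -- liste.append("END")
  ((PySem.List.pyRange 0 (L.length) 1).foldl (stepA L case) ([], [])).2

-- ===== PORT B =====
def regroupe_regulier_alt (liste : List String) (case : Int) : List String :=
  let L := liste ++ ["END"]                      -- liste.append("END")
  let k := PySem.Int.floordiv ((L.length : Int) - 1) case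
  (PySem.List.pyRange 0 k 1).map
    (fun i => PySem.Str.join "" (PySem.List.slice L (some (i * case)) (some ((i + 1) * case))))

-- ===== PRECONDITION & SPEC =====
-- Pre_ excludes case ≤ 0: at case = 0 both programs raise ZeroDivisionError, and for negative
-- case A's abs-like chunking is an accidental artefact of Python's sign rule for '%' (a corner
-- no caller of a chunking helper would specify), where B naturally produces no chunks.
def Pre_regroupe_regulier (liste : List String) (case : Int) : Prop := 1 ≤ case
instance (liste : List String) (case : Int) : Decidable (Pre_regroupe_regulier liste case) := by unfold Pre_regroupe_regulier; infer_instance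
def pvWitness_regroupe_regulier : List String × Int := (["ab", "c", "d"], 2)
def Spec_regroupe_regulier (liste : List String) (case : Int) (out : List String) : Prop := out = regroupe_regulier_alt liste case
instance (liste : List String) (case : Int) (out : List String) : Decidable (Spec_regroupe_regulier liste case out) := by unfold Spec_regroupe_regulier; infer_instance

-- ===== CLAIM (what is proved, stated in full; the proofs are below) =====
def Claim_equal_regroupe_regulier : Prop := ∀ (liste : List String) (case : Int), Dom_regroupe_regulier liste case → Pre_regroupe_regulier liste case → Spec_regroupe_regulier liste case (regroupe_regulier liste case)

-- ===== LEMMAS AND PROOFS =====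

def chunkOf (L : List String) (s : Nat) (j : Nat) : String :=
  PySem.Str.join "" ((L.drop (j * s)).take s)

lemma loopA_inv (L : List String) (case : Int) (hc : case ≠ 0) (m : Nat) (hm : m ≤ L.length) :
    (PySem.List.pyRange 0 (m : Int) 1).foldl (stepA L case) ([], [])
      = ((L.take m).drop (((m - 1) / case.natAbs) * case.natAbs),
         (List.range ((m - 1) / case.natAbs)).map (chunkOf L case.natAbs)) := by
  have hs : 0 < case.natAbs := Int.natAbs_pos.mpr hc
  set s := case.natAbs with hsdef
  induction m with
  | zero => simp [PySem.List.pyRange]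
  | succ m ih =>
    have hm' : m ≤ L.length := Nat.le_of_succ_le hm
    have hrange : PySem.List.pyRange 0 ((m : Int) + 1) 1
        = PySem.List.pyRange 0 (m : Int) 1 ++ [(m : Int)] :=
      PySem.List.pyRange_one_succ_right (by positivity)
    push_cast
    rw [hrange, List.foldl_append, ih hm']
    simp only [List.foldl_cons, List.foldl_nil]
    have hdvd : PySem.Int.mod (m : Int) case = 0 ↔ s ∣ m := by
      rw [PySem.Int.mod_eq_zero_iff_dvd]
      constructor
      · intro h
        have := Int.natAbs_dvd_natAbs.mpr h
        simpa using this
      · intro h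
        have : (s : Int) ∣ (m : Int) := by exact_mod_cast h
        exact (Int.natAbs_dvd).mp this
    have hmlt : m < L.length := hm
    have hget : PySem.List.pyGetD L (m : Int) "" = L[m] := by
      rw [PySem.List.pyGetD_natCast]
      exact List.getD_eq_getElem L "" hmlt
    have hltake : (L.take m).length = m := List.length_take_of_le hm'
    by_cases hcase : s ∣ m ∧ m ≠ 0
    · obtain ⟨hd, hm0⟩ := hcase
      have hm1 : 1 ≤ m := Nat.one_le_iff_ne_zero.mpr hm0
      obtain ⟨c, rfl⟩ := hd
      have hc1 : 1 ≤ c := Nat.pos_of_ne_zero (by rintro rfl; simp at hm0)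
      have e1 : (c - 1) * s = c * s - s := Nat.sub_one_mul c s
      have e2 : s * c = c * s := Nat.mul_comm s c
      have hle : s ≤ c * s := Nat.le_mul_of_pos_left s hc1
      have hq1 : (s * c - 1) / s = c - 1 := by
        apply Nat.div_eq_of_lt_le
        · omega
        · rw [Nat.sub_add_cancel hc1]; omega
      have hq2 : s * c / s = c := Nat.mul_div_cancel_left _ hs
      rw [stepA]
      rw [if_pos ⟨hdvd.mpr ⟨c, rfl⟩, by exact_mod_cast hm0⟩]
      simp only [hget, hq1, hq2]
      rw [Prod.mk.injEq]
      refine ⟨?_, ?_⟩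
      · -- new li: [] ++ [L[s*c]] = drop (c*s) (take (s*c+1) L)
        rw [List.take_succ_eq_append_getElem hmlt,
            List.drop_append_of_le_length (by omega),
            List.drop_eq_nil_of_le (by omega)]
      · -- new li2
        conv_rhs => rw [show c = c - 1 + 1 from (Nat.sub_add_cancel hc1).symm,
          List.range_succ]
        rw [List.map_append]
        congr 1
        simp only [List.map_cons, List.map_nil]
        -- join "" (drop ((c-1)*s) (take (s*c) L)) = chunkOf L s (c-1)
        rw [chunkOf, List.drop_take]
        congr 3
        omega
    · rw [stepA]
      rw [if_neg (by
        rintro ⟨h1, h2⟩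
        exact hcase ⟨hdvd.mp h1, by exact_mod_cast h2⟩)]
      simp only [hget]
      have hq : m / s = (m - 1) / s := by
        rcases Nat.eq_zero_or_pos m with rfl | hm1
        · simp
        · have hnd : ¬ s ∣ m := by
            intro h; exact hcase ⟨h, Nat.pos_iff_ne_zero.mp hm1⟩
          have h2 := Nat.succ_div (a := m - 1) (b := s)
          rw [Nat.sub_add_cancel hm1] at h2
          simp [h2, hnd]
      rw [hq]
      rw [Prod.mk.injEq]
      refine ⟨?_, ?_⟩
      · rw [List.take_succ_eq_append_getElem hmlt,
            List.drop_append_of_le_length (by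
              rw [hltake]
              calc (m - 1) / s * s ≤ m - 1 := Nat.div_mul_le_self _ _
                _ ≤ m := Nat.sub_le _ _)]
      · rfl

theorem regroupe_regulier_spec_aux (liste : List String) (case : Int) (hc : 1 ≤ case) :
    regroupe_regulier liste case = regroupe_regulier_alt liste case := by
  unfold regroupe_regulier regroupe_regulier_alt
  simp only []
  set L := liste ++ ["END"] with hL
  set s : Nat := case.natAbs with hsdef
  have hs : 0 < s := Int.natAbs_pos.mpr (by omega)
  have hcs : case = (s : Int) := by
    rw [hsdef, Int.natAbs_of_nonneg (by omega)]
  have hk : PySem.Int.floordiv ((L.length : Int) - 1) case = ((L.length - 1) / s : Nat) := by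
    rw [hcs]
    have h1 : 1 ≤ L.length := by rw [hL]; simp
    rw [show ((L.length : Int) - 1) = ((L.length - 1 : Nat) : Int) by omega]
    exact PySem.Int.floordiv_natCast _ _
  rw [loopA_inv L case (by omega) L.length le_rfl]
  rw [hk, PySem.List.pyRange_zero_nat]
  rw [List.map_map]
  apply List.map_congr_left
  intro j hj
  simp only [Function.comp_apply]
  rw [hcs]
  rw [show ((j : Int) * s) = ((j * s : Nat) : Int) by push_cast; ring]
  rw [show ((j : Int) + 1) * (s : Int) = ((j * s : Nat) : Int) + ((s : Nat) : Int) by push_cast; ring]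
  rw [PySem.List.slice_natCast_add]
  rfl

-- ===== VERDICT (by name: the statement is the Claim_ definition above) =====
theorem regroupe_regulier_spec : Claim_equal_regroupe_regulier := by
  intro liste case _ hpre
  unfold Spec_regroupe_regulier
  exact regroupe_regulier_spec_aux liste case hpre
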